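-- pv_equiv track=rewrite | github.com/arnokamphuis/graph-mem-mcp | mcp_server/enhanced_knowledge_processor.py | _map_enhanced_entity_type
-- ===== SOURCE A (Python) =====
-- def _map_enhanced_entity_type(spacy_label: str, entity_name: str, text: str) -> str:
--     """Enhanced entity type mapping with context awareness"""
--     entity_lower = entity_name.lower()
--     text_lower = text.lower()
--
--     # Check if it's a profession based on context
--     if any(prof in text_lower for prof in ['planner', 'council', 'work']):
--         if any(word in entity_lower for word in ['planner', 'council', 'urban']):
--             return "profession"
--
--     # Check if it's a hobby based on context
--     if any(hobby in text_lower for hobby in ['woodworking', 'guitar', 'music', 'birdwatching']):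
--         if any(word in entity_lower for word in ['wood', 'guitar', 'music', 'bird']):
--             return "hobby"
--
--     # Check if it's a location based on context
--     if any(loc in text_lower for loc in ['house', 'garden', 'park', 'shed']):
--         if any(word in entity_lower for word in ['house', 'garden', 'park', 'shed']):
--             return "location"
--
--     # Default spaCy mapping
--     type_mapping = {
--         'PERSON': 'person',
--         'ORG': 'organization',
--         'GPE': 'location',
--         'LOC': 'location',
--         'EVENT': 'event',
--         'DATE': 'date',
--         'TIME': 'time',
--         'MONEY': 'money',
--         'CARDINAL': 'number',
--         'ORDINAL': 'number'
--     }
--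
--     return type_mapping.get(spacy_label, 'concept')
-- ===== SOURCE B (Python) =====
-- # Inverted keyword->category index: collect the category sets evidenced by text
-- # and by entity name in two staged passes, intersect them, and pick by priority.
--
-- _CTX_KW = [
--     ('planner', 'profession'), ('council', 'profession'), ('work', 'profession'),
--     ('woodworking', 'hobby'), ('guitar', 'hobby'), ('music', 'hobby'), ('birdwatching', 'hobby'),
--     ('house', 'location'), ('garden', 'location'), ('park', 'location'), ('shed', 'location'),
-- ]
--
-- _ENT_KW = [
--     ('planner', 'profession'), ('council', 'profession'), ('urban', 'profession'),
--     ('wood', 'hobby'), ('guitar', 'hobby'), ('music', 'hobby'), ('bird', 'hobby'),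
--     ('house', 'location'), ('garden', 'location'), ('park', 'location'), ('shed', 'location'),
-- ]
--
-- _PRIORITY = ('profession', 'hobby', 'location')
--
-- _SPACY_MAP = {
--     'PERSON': 'person',
--     'ORG': 'organization',
--     'GPE': 'location',
--     'LOC': 'location',
--     'EVENT': 'event',
--     'DATE': 'date',
--     'TIME': 'time',
--     'MONEY': 'money',
--     'CARDINAL': 'number',
--     'ORDINAL': 'number',
-- }
--
-- def _map_enhanced_entity_type(spacy_label: str, entity_name: str, text: str) -> str:
--     text_lower = text.lower()
--     entity_lower = entity_name.lower()
--     ctx_cats = {cat for kw, cat in _CTX_KW if kw in text_lower}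
--     ent_cats = {cat for kw, cat in _ENT_KW if kw in entity_lower}
--     both = ctx_cats & ent_cats
--     for cat in _PRIORITY:
--         if cat in both:
--             return cat
--     return _SPACY_MAP.get(spacy_label, 'concept')
-- ===== Notes on version B (the rewrite author's own statement) =====
-- stated objective: alternative
-- what changed: Replaces the three nested if-blocks by an inverted keyword-to-category index: two staged passes collect the category sets evidenced by the text and by the entity name, their set intersection is taken, and the answer is the highest-priority category in the intersection, falling back to the spaCy dict lookup.
import Mathlib
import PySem

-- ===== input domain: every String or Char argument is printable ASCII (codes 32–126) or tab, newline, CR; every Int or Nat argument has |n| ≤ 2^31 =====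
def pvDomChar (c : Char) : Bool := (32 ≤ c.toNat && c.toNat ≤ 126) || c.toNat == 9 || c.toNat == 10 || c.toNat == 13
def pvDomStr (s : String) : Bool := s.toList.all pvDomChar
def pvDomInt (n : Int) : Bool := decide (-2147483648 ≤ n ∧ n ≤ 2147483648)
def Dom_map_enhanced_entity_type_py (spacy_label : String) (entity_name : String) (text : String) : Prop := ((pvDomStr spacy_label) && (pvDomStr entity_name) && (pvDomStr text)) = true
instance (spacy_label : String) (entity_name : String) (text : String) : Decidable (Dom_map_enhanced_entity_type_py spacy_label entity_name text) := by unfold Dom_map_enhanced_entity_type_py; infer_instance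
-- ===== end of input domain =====

-- B replaces A's three nested if-blocks by an inverted keyword→category index: two staged
-- passes collect the category sets evidenced by text and by entity name, then the
-- highest-priority category of their intersection is returned (objective: alternative).

-- ===== PORT A =====
-- A's final spaCy dict lookup: type_mapping.get(spacy_label, 'concept')
def pvADefault (spacy_label : String) : String :=
  PySem.Dict.getD
    (PySem.Dict.ofList [("PERSON", "person"), ("ORG", "organization"), ("GPE", "location"), ("LOC", "location"),
     ("EVENT", "event"), ("DATE", "date"), ("TIME", "time"), ("MONEY", "money"),
     ("CARDINAL", "number"), ("ORDINAL", "number")]) spacy_label "concept"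

-- A's third check block (location), falling through to the default mapping
def pvACheck3 (spacy_label : String) (entity_lower text_lower : String) : String :=
  if ["house", "garden", "park", "shed"].any (fun loc => PySem.Str.isIn loc text_lower) then
    if ["house", "garden", "park", "shed"].any (fun word => PySem.Str.isIn word entity_lower) then
      "location"
    else pvADefault spacy_label
  else pvADefault spacy_label

-- A's second check block (hobby), falling through to the third
def pvACheck2 (spacy_label : String) (entity_lower text_lower : String) : String :=
  if ["woodworking", "guitar", "music", "birdwatching"].any (fun hobby => PySem.Str.isIn hobby text_lower) then
    if ["wood", "guitar", "music", "bird"].any (fun word => PySem.Str.isIn word entity_lower) then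
      "hobby"
    else pvACheck3 spacy_label entity_lower text_lower
  else pvACheck3 spacy_label entity_lower text_lower

def map_enhanced_entity_type_py (spacy_label : String) (entity_name : String) (text : String) : String :=
  let entity_lower := PySem.Str.lower entity_name
  let text_lower := PySem.Str.lower text
  if ["planner", "council", "work"].any (fun prof => PySem.Str.isIn prof text_lower) then
    if ["planner", "council", "urban"].any (fun word => PySem.Str.isIn word entity_lower) then
      "profession"
    else pvACheck2 spacy_label entity_lower text_lower
  else pvACheck2 spacy_label entity_lower text_lower

-- ===== PORT B =====
-- inverted index: context keyword → category it evidences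
def pvBCtxKW : List (String × String) :=
  [("planner", "profession"), ("council", "profession"), ("work", "profession"),
   ("woodworking", "hobby"), ("guitar", "hobby"), ("music", "hobby"), ("birdwatching", "hobby"),
   ("house", "location"), ("garden", "location"), ("park", "location"), ("shed", "location")]

-- inverted index: entity-name keyword → category it evidences
def pvBEntKW : List (String × String) :=
  [("planner", "profession"), ("council", "profession"), ("urban", "profession"),
   ("wood", "hobby"), ("guitar", "hobby"), ("music", "hobby"), ("bird", "hobby"),
   ("house", "location"), ("garden", "location"), ("park", "location"), ("shed", "location")]

def pvBPriority : List String := ["profession", "hobby", "location"]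

def pvBSpacyMap : PySem.Dict String String :=
  PySem.Dict.ofList [("PERSON", "person"), ("ORG", "organization"), ("GPE", "location"), ("LOC", "location"),
   ("EVENT", "event"), ("DATE", "date"), ("TIME", "time"), ("MONEY", "money"),
   ("CARDINAL", "number"), ("ORDINAL", "number")]

def map_enhanced_entity_type_py_alt (spacy_label : String) (entity_name : String) (text : String) : String :=
  let text_lower := PySem.Str.lower text
  let entity_lower := PySem.Str.lower entity_name
  let ctx_cats : PySem.Set String :=
    PySem.Set.ofList ((pvBCtxKW.filter (fun p => PySem.Str.isIn p.1 text_lower)).map Prod.snd)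
  let ent_cats : PySem.Set String :=
    PySem.Set.ofList ((pvBEntKW.filter (fun p => PySem.Str.isIn p.1 entity_lower)).map Prod.snd)
  let both := PySem.Set.inter ctx_cats ent_cats
  match pvBPriority.find? (fun cat => PySem.Set.contains both cat) with
  | some cat => cat
  | none => PySem.Dict.getD pvBSpacyMap spacy_label "concept"

-- ===== PRECONDITION & SPEC =====
def Spec_map_enhanced_entity_type_py (spacy_label : String) (entity_name : String) (text : String) (out : String) : Prop := out = map_enhanced_entity_type_py_alt spacy_label entity_name text
instance (spacy_label : String) (entity_name : String) (text : String) (out : String) : Decidable (Spec_map_enhanced_entity_type_py spacy_label entity_name text out) := by unfold Spec_map_enhanced_entity_type_py; infer_instance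

-- ===== CLAIM (what is proved, stated in full; the proofs are below) =====
def Claim_equal_map_enhanced_entity_type_py : Prop := ∀ (spacy_label : String) (entity_name : String) (text : String), Dom_map_enhanced_entity_type_py spacy_label entity_name text → Spec_map_enhanced_entity_type_py spacy_label entity_name text (map_enhanced_entity_type_py spacy_label entity_name text)

-- ===== LEMMAS AND PROOFS =====
-- membership in a set intersection is the conjunction of the memberships
theorem pv_contains_inter (s t : PySem.Set String) (x : String) :
    PySem.Set.contains (PySem.Set.inter s t) x = (PySem.Set.contains s x && PySem.Set.contains t x) := by
  simp [PySem.Set.inter, PySem.Set.contains, List.mem_filter]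

-- membership of a category in the set collected from an inverted-index pass is the
-- disjunction of that category's keyword tests
theorem pv_contains_collect (l : List (String × String)) (f : String × String → Bool) (cat : String) :
    PySem.Set.contains (PySem.Set.ofList ((l.filter f).map Prod.snd)) cat
      = l.any (fun p => f p && (p.2 == cat)) := by
  rw [Bool.eq_iff_iff]
  simp [PySem.Set.contains, PySem.Set.mem_ofList, List.mem_filter, List.mem_map,
    List.any_eq_true]

-- bridge: A's nested-if fall-through chain equals B's priority scan over the
-- intersection memberships, for arbitrary boolean atoms (64-way case split)
theorem pv_bridge (c1 e1 c2 e2 c3 e3 : Bool) (d : String) :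
    (if c1 then (if e1 then "profession"
       else if c2 then (if e2 then "hobby"
         else if c3 then (if e3 then "location" else d) else d)
       else if c3 then (if e3 then "location" else d) else d)
     else if c2 then (if e2 then "hobby"
         else if c3 then (if e3 then "location" else d) else d)
       else if c3 then (if e3 then "location" else d) else d)
    =
    (match (match (c1 && e1) with
            | true => some "profession"
            | false => match (c2 && e2) with
              | true => some "hobby"
              | false => match (c3 && e3) with
                | true => some "location"
                | false => (none : Option String)) with
     | some cat => cat
     | none => d) := by
  cases c1 <;> cases e1 <;> cases c2 <;> cases e2 <;> cases c3 <;> cases e3 <;> rfl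

-- ===== VERDICT (by name: the statement is the Claim_ definition above) =====
theorem map_enhanced_entity_type_py_spec : Claim_equal_map_enhanced_entity_type_py := by
  intro spacy_label entity_name text _
  show _ = _
  simp only [map_enhanced_entity_type_py, map_enhanced_entity_type_py_alt,
    pvACheck2, pvACheck3, pvBPriority, List.find?,
    pv_contains_inter, pv_contains_collect, pvBCtxKW, pvBEntKW,
    pvADefault, pvBSpacyMap]
  simp only [List.any_cons, List.any_nil, String.reduceBEq, beq_self_eq_true,
    Bool.and_true, Bool.and_false, Bool.or_false, Bool.false_or]
  exact pv_bridge _ _ _ _ _ _ _
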